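-- pv_equiv track=rewrite | github.com/Juju85194/projet-python-1A | delivery_network/main.py | duplicate_trucks
-- ===== SOURCE A (Python) =====
-- def duplicate_trucks(trucks,budget):
--     """Duplicate trucks to account for unlimited stock
--     Args:
--         trucks (list): list of trucks
--         budget (int): budget
--     Returns:
--         list: list of trucks duplicated
--     """
--     total_cost = 0
--     duplicated_trucks = []
--
--     for truck in trucks:
--         while total_cost < budget:
--             total_cost += truck[1]
--             duplicated_trucks.append(truck)
--         total_cost = 0
--
--     return duplicated_trucks
-- ===== SOURCE B (Python) =====
-- def duplicate_trucks(trucks, budget):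
--     """Duplicate trucks to account for unlimited stock (closed-form count per truck)."""
--     out = []
--     if budget <= 0:
--         return out
--     for truck in trucks:
--         cost = truck[1]
--         out.extend([truck] * ((budget + cost - 1) // cost))
--     return out
-- ===== Notes on version B (the rewrite author's own statement) =====
-- stated objective: simpler
-- what changed: Replaces the inner while loop with its running cost accumulator by a closed-form ceiling-division count per truck and list replication.
import Mathlib
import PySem

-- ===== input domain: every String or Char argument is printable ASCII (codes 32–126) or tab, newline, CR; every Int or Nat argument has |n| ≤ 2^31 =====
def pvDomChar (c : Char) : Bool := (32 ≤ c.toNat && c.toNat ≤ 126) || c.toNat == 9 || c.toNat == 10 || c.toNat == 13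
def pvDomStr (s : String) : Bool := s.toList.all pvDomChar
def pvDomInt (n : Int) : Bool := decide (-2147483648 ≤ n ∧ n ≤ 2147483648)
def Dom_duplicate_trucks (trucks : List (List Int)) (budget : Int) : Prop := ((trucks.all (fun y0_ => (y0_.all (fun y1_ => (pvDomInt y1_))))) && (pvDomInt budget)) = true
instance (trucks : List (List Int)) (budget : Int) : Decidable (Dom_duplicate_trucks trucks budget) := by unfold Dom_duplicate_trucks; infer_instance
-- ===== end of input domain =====

-- B replaces A's inner while loop by a closed-form ceiling-division copy count per truck.

-- ===== PORT A =====
-- the inner `while total_cost < budget` loop; fuel budget.toNat+1 suffices under Pre_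
-- (each iteration adds truck[1] ≥ 1 to total_cost, so at most budget iterations run)
def pvInnerA (truck : List Int) (budget : Int) : Nat → Int → List (List Int) → List (List Int)
  | 0, _, acc => acc
  | fuel+1, tc, acc =>
    if tc < budget then
      match PySem.List.pyGet? truck 1 with
      | some c => pvInnerA truck budget fuel (tc + c) (acc ++ [truck])
      | none => acc   -- IndexError in Python; excluded by Pre_
    else acc

def duplicate_trucks (trucks : List (List Int)) (budget : Int) : List (List Int) :=
  trucks.foldl (fun acc truck => pvInnerA truck budget (budget.toNat + 1) 0 acc) []

-- ===== PORT B =====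
def duplicate_trucks_alt (trucks : List (List Int)) (budget : Int) : List (List Int) :=
  if budget ≤ 0 then []
  else
    trucks.foldl (fun out truck =>
      match PySem.List.pyGet? truck 1 with
      | some c => out ++ List.replicate (PySem.Int.floordiv (budget + c - 1) c).toNat truck
      | none => out   -- IndexError in Python; excluded by Pre_
      ) []

-- ===== PRECONDITION & SPEC =====
-- Pre_ excludes inputs where A diverges (truck[1] ≤ 0 with budget > 0) or raises IndexError
-- (a truck shorter than 2 with budget > 0); when budget ≤ 0 the trucks are never inspected.
def Pre_duplicate_trucks (trucks : List (List Int)) (budget : Int) : Prop :=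
  budget ≤ 0 ∨ ∀ t ∈ trucks, 0 < ((PySem.List.pyGet? t 1).getD 0)
instance (trucks : List (List Int)) (budget : Int) : Decidable (Pre_duplicate_trucks trucks budget) := by unfold Pre_duplicate_trucks; infer_instance
def pvWitness_duplicate_trucks : List (List Int) × Int := ([[1, 3], [2, 5]], 7)

def Spec_duplicate_trucks (trucks : List (List Int)) (budget : Int) (out : List (List Int)) : Prop := out = duplicate_trucks_alt trucks budget
instance (trucks : List (List Int)) (budget : Int) (out : List (List Int)) : Decidable (Spec_duplicate_trucks trucks budget out) := by unfold Spec_duplicate_trucks; infer_instance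

-- ===== CLAIM (what is proved, stated in full; the proofs are below) =====
def Claim_equal_duplicate_trucks : Prop := ∀ (trucks : List (List Int)) (budget : Int), Dom_duplicate_trucks trucks budget → Pre_duplicate_trucks trucks budget → Spec_duplicate_trucks trucks budget (duplicate_trucks trucks budget)

-- ===== LEMMAS AND PROOFS =====

-- the while loop appends exactly ⌈(budget - tc)/c⌉ copies when c > 0 and enough fuel remains
lemma pvInnerA_eq (truck : List Int) (budget c : Int) (hc : 0 < c)
    (hg : PySem.List.pyGet? truck 1 = some c) :
    ∀ (fuel : Nat) (tc : Int) (acc : List (List Int)),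
      ((budget - tc + c - 1) / c).toNat ≤ fuel →
      pvInnerA truck budget fuel tc acc = acc ++ List.replicate ((budget - tc + c - 1) / c).toNat truck := by
  intro fuel
  induction fuel with
  | zero =>
    intro tc acc h
    have h0 : ((budget - tc + c - 1) / c).toNat = 0 := Nat.le_zero.mp h
    simp [pvInnerA, h0]
  | succ f ih =>
    intro tc acc h
    by_cases hlt : tc < budget
    · have hk1 : (1 : Int) ≤ (budget - tc + c - 1) / c := by
        rw [Int.le_ediv_iff_mul_le hc]; omega
      have hstep : (budget - (tc + c) + c - 1) / c = (budget - tc + c - 1) / c - 1 := by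
        have : budget - tc + c - 1 = (budget - (tc + c) + c - 1) + 1 * c := by ring
        rw [this, Int.add_mul_ediv_right _ _ (by omega : c ≠ 0)]; omega
      have hkn : ((budget - tc + c - 1) / c).toNat = ((budget - (tc + c) + c - 1) / c).toNat + 1 := by
        omega
      simp only [pvInnerA, if_pos hlt, hg]
      rw [ih (tc + c) (acc ++ [truck]) (by omega)]
      rw [hkn, List.replicate_succ, List.append_assoc]
      rfl
    · have hk0 : (budget - tc + c - 1) / c < 1 := by
        rw [Int.ediv_lt_iff_lt_mul hc]; omega
      have h0 : ((budget - tc + c - 1) / c).toNat = 0 := by omega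
      simp [pvInnerA, hlt, h0]

lemma pvInnerA_stop (truck : List Int) (budget : Int) (hb : budget ≤ 0)
    (fuel : Nat) (acc : List (List Int)) :
    pvInnerA truck budget fuel 0 acc = acc := by
  cases fuel with
  | zero => rfl
  | succ f =>
    have h0 : ¬ (0 : Int) < budget := by omega
    simp [pvInnerA, h0]

theorem duplicate_trucks_spec_aux (trucks : List (List Int)) (budget : Int)
    (hpre : Pre_duplicate_trucks trucks budget) :
    duplicate_trucks trucks budget = duplicate_trucks_alt trucks budget := by
  rcases hpre with hb | hpos
  · -- budget ≤ 0 : A's while loop never runs, B returns []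
    unfold duplicate_trucks duplicate_trucks_alt
    rw [if_pos hb]
    induction trucks with
    | nil => rfl
    | cons t ts ih => simpa [List.foldl_cons, pvInnerA_stop t budget hb] using ih
  · -- budget > 0 case (if budget ≤ 0 too, the first branch applies; here handle both)
    by_cases hb : budget ≤ 0
    · unfold duplicate_trucks duplicate_trucks_alt
      rw [if_pos hb]
      induction trucks with
      | nil => rfl
      | cons t ts ih =>
        simp only [List.mem_cons] at hpos
        simpa [List.foldl_cons, pvInnerA_stop t budget hb] using
          ih (fun t' ht' => hpos t' (Or.inr ht'))
    · push Not at hb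
      unfold duplicate_trucks duplicate_trucks_alt
      rw [if_neg (by omega)]
      -- both folds agree for any common accumulator
      suffices h : ∀ (ts : List (List Int)), (∀ t ∈ ts, 0 < ((PySem.List.pyGet? t 1).getD 0)) →
          ∀ acc, ts.foldl (fun acc truck => pvInnerA truck budget (budget.toNat + 1) 0 acc) acc
            = ts.foldl (fun out truck =>
                match PySem.List.pyGet? truck 1 with
                | some c => out ++ List.replicate (PySem.Int.floordiv (budget + c - 1) c).toNat truck
                | none => out) acc by
        exact h trucks hpos []
      intro ts hts
      induction ts with
      | nil => intro acc; rfl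
      | cons t ts ih =>
        intro acc
        simp only [List.mem_cons] at hts
        have ht := hts t (Or.inl rfl)
        obtain ⟨c, hg, hc⟩ : ∃ c, PySem.List.pyGet? t 1 = some c ∧ 0 < c := by
          cases hval : PySem.List.pyGet? t 1 with
          | none => rw [hval] at ht; simp at ht
          | some c => rw [hval] at ht; exact ⟨c, rfl, by simpa using ht⟩
        have hfd : PySem.Int.floordiv (budget + c - 1) c = (budget + c - 1) / c :=
          PySem.Int.floordiv_eq_ediv_of_pos hc
        have hfuel : ((budget - 0 + c - 1) / c).toNat ≤ budget.toNat + 1 := by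
          have : (budget - 0 + c - 1) / c < budget + 1 := by
            rw [Int.ediv_lt_iff_lt_mul hc]
            nlinarith
          omega
        simp only [List.foldl_cons, hg]
        rw [pvInnerA_eq t budget c hc hg (budget.toNat + 1) 0 acc hfuel]
        rw [ih (fun t' ht' => hts t' (Or.inr ht'))]
        congr 2
        rw [hfd]
        norm_num

-- ===== VERDICT (by name: the statement is the Claim_ definition above) =====
theorem duplicate_trucks_spec : Claim_equal_duplicate_trucks := by
  intro trucks budget _ hpre
  exact duplicate_trucks_spec_aux trucks budget hpre
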